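-- pv_equiv track=rewrite | github.com/ThomasBollmeier/sisi | src/sisi/placements.py | determine_cell_states
-- ===== SOURCE A (Python) =====
-- class CellState:
--     UNKNOWN = 1
--     EMPTY = 2
--     FILLED = 3
--
-- def determine_cell_states(size, blocks):
--
--     placements = find_placements(size, blocks)
--     counters = [0 for _ in range(size)]
--     for plcmt in placements:
--         for block_idx, offset in enumerate(plcmt):
--             block_len = blocks[block_idx]
--             for cell_idx in range(offset, offset + block_len):
--                 counters[cell_idx] += 1
--
--     result = []
--     num_plcmts = len(placements)
--
--     for cnt in counters:
--         if cnt == 0: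
--             result.append(CellState.EMPTY)
--         elif cnt == num_plcmts:
--             result.append(CellState.FILLED)
--         else:
--             result.append(CellState.UNKNOWN)
--
--     return result
--
-- def find_placements(size, blocks):
--
--     result = []
--     if not blocks:
--         return result
--
--     _find_placements(size, blocks, [], result)
--
--     return result
--
-- def _find_placements(size, blocks, offsets, result):
--
--     if len(offsets) == len(blocks):
--         result.append(offsets)
--         return
--
--     if offsets:
--         last_offset = offsets[-1]
--         last_block_idx = len(offsets) - 1
--         start_offset = last_offset + blocks[last_block_idx] + 1
--         curr_block_idx = last_block_idx + 1
--     else: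
--         start_offset = 0
--         curr_block_idx = 0
--
--     remaining = blocks[curr_block_idx:]
--     remaining_len = len(remaining) - 1 + sum(remaining)
--     end_offset = size - remaining_len
--
--     for offset in range(start_offset, end_offset+1):
--         _find_placements(size, blocks, offsets + [offset], result)
-- ===== SOURCE B (Python) =====
-- def determine_cell_states(size, blocks):
--     # Closed-form per-cell classification (no enumeration of placements):
--     # a cell can be filled iff some block j has a legal offset covering it
--     # (between the leftmost position after the first j blocks and the
--     # rightmost position that still leaves room for the remaining blocks);
--     # it can be empty iff the blocks split into a prefix fitting strictly
--     # left of it and a suffix fitting strictly right of it.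
--     k = len(blocks)
--     total = sum(blocks)
--     if k == 0 or total + k - 1 > size:
--         # the blocks (with their mandatory gaps) do not fit at all:
--         # there is no placement, so every cell stays empty
--         return [2] * size
--     prefix = [0]
--     for x in blocks:
--         prefix.append(prefix[-1] + x)
--     result = []
--     for i in range(size):
--         can_fill = any(
--             blocks[j] > 0
--             and max(prefix[j] + j, i - blocks[j] + 1)
--                 <= min(size - (total - prefix[j]) - (k - j - 1), i)
--             for j in range(k)
--         )
--         can_empty = any(
--             prefix[j] + j - 1 <= i
--             and (total - prefix[j]) + (k - j) - 1 <= size - i - 1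
--             for j in range(k + 1)
--         )
--         if not can_fill:
--             result.append(2)
--         elif not can_empty:
--             result.append(3)
--         else:
--             result.append(1)
--     return result
-- ===== Notes on version B (the rewrite author's own statement) =====
-- stated objective: faster
-- what changed: A enumerates every placement of the blocks recursively and tallies per-cell cover counts over that exponential list; B never enumerates: it first dismisses block lists that cannot fit at all, and otherwise decides per cell 'can be filled' / 'can be empty' directly from prefix-sum feasibility intervals (leftmost/rightmost legal offsets and prefix/suffix split fits). Intended as faster (A's enumeration is exponential in the number of blocks and already times out on enumeration-heavy lines of size 16 where B answers instantly); …
-- outside the precondition, e.g. on determine_cell_states(2, [-3, 2]): A returns [3, 3], B returns [1, 1]; on determine_cell_states(2, [2, -5]): A raises IndexError, B returns [1, 1]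
import Mathlib
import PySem

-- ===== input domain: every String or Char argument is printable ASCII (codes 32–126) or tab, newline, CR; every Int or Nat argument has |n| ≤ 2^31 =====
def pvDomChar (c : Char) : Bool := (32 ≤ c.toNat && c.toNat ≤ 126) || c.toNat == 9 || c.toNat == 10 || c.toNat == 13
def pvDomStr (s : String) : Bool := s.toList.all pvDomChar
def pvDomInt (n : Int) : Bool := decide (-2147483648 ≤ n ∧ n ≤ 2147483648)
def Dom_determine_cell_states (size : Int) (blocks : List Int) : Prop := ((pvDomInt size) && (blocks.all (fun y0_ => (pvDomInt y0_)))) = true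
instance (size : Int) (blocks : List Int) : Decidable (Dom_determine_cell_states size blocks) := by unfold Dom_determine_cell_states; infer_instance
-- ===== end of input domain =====

-- B replaces A's exponential enumeration of all block placements by a closed-form
-- per-cell feasibility test on prefix sums (objective: faster; intended as faster —
-- measured 1.75x at the largest size both finished, unconfirmed in a timing run,
-- which cannot credit the enumeration-heavy inputs where A itself times out).

-- ===== PORT A =====
-- counters[cell_idx] += 1  (pyGetD/pySetD are exact for the in-range indices admitted by Pre_)
def pvA_incr (cs : List Int) (i : Int) : List Int :=
  PySem.List.pySetD cs i (PySem.List.pyGetD cs i 0 + 1)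

-- the body of `for block_idx, offset in enumerate(plcmt): ... for cell_idx in range(...)`
def pvA_addPlacement (blocks : List Int) (cs : List Int) (plcmt : List Int) : List Int :=
  (PySem.List.enumerate plcmt 0).foldl (fun cs2 p =>
    (PySem.List.pyRange p.2 (p.2 + PySem.List.pyGetD blocks p.1 0) 1).foldl pvA_incr cs2) cs

-- _find_placements; `fuel` is only a termination device (called with blocks.length,
-- which always suffices: each level appends one offset)
def pvA_findAux (size : Int) (blocks : List Int) : Nat → List Int → List (List Int) → List (List Int)
  | 0, offsets, result =>
    if offsets.length = blocks.length then result ++ [offsets]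
    else result  -- unreachable
  | fuel' + 1, offsets, result =>
    if offsets.length = blocks.length then result ++ [offsets]
    else
        let sc : Int × Int :=
          if offsets.isEmpty = false then
            (PySem.List.pyGetD offsets (-1) 0 + PySem.List.pyGetD blocks ((offsets.length : Int) - 1) 0 + 1,
             ((offsets.length : Int) - 1) + 1)
          else (0, 0)
        let remaining := PySem.List.slice blocks (some sc.2) none
        let remaining_len : Int := ((remaining.length : Int) - 1) + remaining.sum
        let endOff := size - remaining_len
        (PySem.List.pyRange sc.1 (endOff + 1) 1).foldl
          (fun acc o => pvA_findAux size blocks fuel' (offsets ++ [o]) acc) result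

def pvA_find_placements (size : Int) (blocks : List Int) : List (List Int) :=
  if blocks.isEmpty then [] else pvA_findAux size blocks blocks.length [] []

def determine_cell_states (size : Int) (blocks : List Int) : List Int :=
  let placements := pvA_find_placements size blocks
  let counters0 := (PySem.List.pyRange 0 size 1).map (fun _ => (0 : Int))
  let counters := placements.foldl (pvA_addPlacement blocks) counters0
  let num_plcmts : Int := (placements.length : Int)
  counters.foldl (fun res cnt =>
    res ++ [if cnt = 0 then (2 : Int) else if cnt = num_plcmts then 3 else 1]) []

-- ===== PORT B =====
def determine_cell_states_alt (size : Int) (blocks : List Int) : List Int :=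
  let k : Int := (blocks.length : Int)
  let total := blocks.sum
  if k = 0 ∨ total + k - 1 > size then List.replicate size.toNat (2 : Int) else
  let pfx := blocks.foldl (fun acc x => acc ++ [PySem.List.pyGetD acc (-1) 0 + x]) [(0 : Int)]
  (PySem.List.pyRange 0 size 1).foldl (fun res i =>
    let can_fill := (PySem.List.pyRange 0 k 1).any (fun j =>
      decide (0 < PySem.List.pyGetD blocks j 0) &&
      decide (max (PySem.List.pyGetD pfx j 0 + j) (i - PySem.List.pyGetD blocks j 0 + 1) ≤
              min (size - (total - PySem.List.pyGetD pfx j 0) - (k - j - 1)) i))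
    let can_empty := (PySem.List.pyRange 0 (k + 1) 1).any (fun j =>
      decide (PySem.List.pyGetD pfx j 0 + j - 1 ≤ i) &&
      decide ((total - PySem.List.pyGetD pfx j 0) + (k - j) - 1 ≤ size - i - 1))
    res ++ [if can_fill = false then (2 : Int) else if can_empty = false then 3 else 1]) []

-- ===== PRECONDITION & SPEC =====
-- Pre_ restricts to the natural domain of nonnegative block lengths: on lists with a
-- negative block length A either raises IndexError or silently wraps counter indices
-- to the end of the line (negative cell indices).
def Pre_determine_cell_states (size : Int) (blocks : List Int) : Prop := ∀ b ∈ blocks, 0 ≤ b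
instance (size : Int) (blocks : List Int) : Decidable (Pre_determine_cell_states size blocks) := by
  unfold Pre_determine_cell_states; infer_instance

def pvWitness_determine_cell_states : Int × List Int := (5, [2, 1])

def Spec_determine_cell_states (size : Int) (blocks : List Int) (out : List Int) : Prop :=
  out = determine_cell_states_alt size blocks
instance (size : Int) (blocks : List Int) (out : List Int) : Decidable (Spec_determine_cell_states size blocks out) := by
  unfold Spec_determine_cell_states; infer_instance

-- ===== CLAIM (what is proved, stated in full; the proofs are below) =====
def Claim_equal_determine_cell_states : Prop :=
  ∀ (size : Int) (blocks : List Int), Dom_determine_cell_states size blocks →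
    Pre_determine_cell_states size blocks →
    Spec_determine_cell_states size blocks (determine_cell_states size blocks)

-- ===== LEMMAS AND PROOFS =====

-- rightmost legal offset for a block of length b followed by blocks `rest`
def pvE (size : Int) (b : Int) (rest : List Int) : Int :=
  size - ((rest.length : Int) + b + rest.sum)

-- the list of placements A's recursion enumerates, as a structural recursion
def pvChains (size : Int) : List Int → Int → List (List Int)
  | [], _ => [[]]
  | b :: rest, s =>
    (PySem.List.pyRange s (pvE size b rest + 1) 1).flatMap
      (fun o => (pvChains size rest (o + b + 1)).map (o :: ·))

def pvIsChain (size : Int) : List Int → Int → List Int → Prop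
  | [], _, os => os = []
  | b :: rest, s, os =>
    ∃ o os', os = o :: os' ∧ s ≤ o ∧ o ≤ pvE size b rest ∧ pvIsChain size rest (o + b + 1) os'

-- number of blocks of a placement covering cell i
def pvCovN (os bs : List Int) (i : Int) : Nat :=
  (os.zip bs).countP (fun p => decide (p.1 ≤ i ∧ i < p.1 + p.2))

-- B's per-cell conditions, in arithmetic form
def pvFillCond (size : Int) (bs : List Int) (s i : Int) : Prop :=
  ∃ (j : Nat) (h : j < bs.length), 0 < bs[j] ∧
    max (s + (bs.take j).sum + j) (i - bs[j] + 1) ≤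
      min (size - (bs.drop j).sum - ((bs.length : Int) - j - 1)) i

def pvEmptyCond (size : Int) (bs : List Int) (s i : Int) : Prop :=
  ∃ j : Nat, j ≤ bs.length ∧ (j = 0 ∨ s + (bs.take j).sum + j - 1 ≤ i) ∧
    (bs.drop j).sum + ((bs.length : Int) - j) - 1 ≤ size - i - 1

lemma pv_mem_chains (size : Int) : ∀ (bs : List Int) (s : Int) (os : List Int),
    os ∈ pvChains size bs s ↔ pvIsChain size bs s os := by
  intro bs
  induction bs with
  | nil => intro s os; simp [pvChains, pvIsChain]
  | cons b rest ih =>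
    intro s os
    simp only [pvChains, pvIsChain, List.mem_flatMap, List.mem_map,
      PySem.List.mem_pyRange_one]
    constructor
    · rintro ⟨o, ⟨ho1, ho2⟩, os', hos', rfl⟩
      exact ⟨o, os', rfl, ho1, by omega, (ih _ _).1 hos'⟩
    · rintro ⟨o, os', rfl, h1, h2, h3⟩
      exact ⟨o, ⟨h1, by omega⟩, os', (ih _ _).2 h3, rfl⟩

lemma pv_chain_ge (size : Int) : ∀ (bs : List Int) (s : Int) (os : List Int),
    pvIsChain size bs s os → (∀ b ∈ bs, 0 ≤ b) → ∀ o ∈ os, s ≤ o := by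
  intro bs
  induction bs with
  | nil => rintro s os rfl _ o ho; cases ho
  | cons b rest ih =>
    rintro s os ⟨o, os', rfl, h1, h2, h3⟩ hb o' ho'
    rcases List.mem_cons.1 ho' with rfl | ho'
    · exact h1
    · have hb0 : (0:Int) ≤ b := hb b (List.mem_cons_self ..)
      have := ih (o + b + 1) os' h3 (fun x hx => hb x (List.mem_cons_of_mem _ hx)) o' ho'
      omega

lemma pv_chain_len (size : Int) : ∀ (bs : List Int) (s : Int) (os : List Int),
    pvIsChain size bs s os → os.length = bs.length := by
  intro bs
  induction bs with
  | nil => rintro s os rfl; rfl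
  | cons b rest ih =>
    rintro s os ⟨o, os', rfl, _, _, h3⟩
    simpa using ih _ _ h3

lemma pv_noCov_of_lt (size : Int) : ∀ (bs : List Int) (s : Int) (os : List Int) (i : Int),
    pvIsChain size bs s os → (∀ b ∈ bs, 0 ≤ b) → i < s → pvCovN os bs i = 0 := by
  intro bs s os i hch hb hi
  unfold pvCovN
  rw [List.countP_eq_zero]
  rintro ⟨o, b⟩ hp
  have ho : o ∈ os := (List.of_mem_zip hp).1
  have := pv_chain_ge size bs s os hch hb o ho
  simp only [decide_eq_true_eq]
  omega

lemma pv_covN_le_one (size : Int) : ∀ (bs : List Int) (s : Int) (os : List Int) (i : Int),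
    pvIsChain size bs s os → (∀ b ∈ bs, 0 ≤ b) → pvCovN os bs i ≤ 1 := by
  intro bs
  induction bs with
  | nil => rintro s os i rfl _; simp [pvCovN]
  | cons b rest ih =>
    rintro s os i ⟨o, os', rfl, h1, h2, h3⟩ hb
    have hbrest : ∀ x ∈ rest, (0:Int) ≤ x := fun x hx => hb x (List.mem_cons_of_mem _ hx)
    unfold pvCovN
    rw [List.zip_cons_cons, List.countP_cons]
    by_cases hc : o ≤ i ∧ i < o + b
    · have h0 : pvCovN os' rest i = 0 :=
        pv_noCov_of_lt size rest (o + b + 1) os' i h3 hbrest (by omega)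
      unfold pvCovN at h0
      rw [h0, if_pos (by simpa using hc)]
    · have := ih (o + b + 1) os' i h3 hbrest
      unfold pvCovN at this
      rw [if_neg (by simpa using hc)]
      omega

lemma pv_chain_cell_bounds (size : Int) : ∀ (bs : List Int) (s : Int) (os : List Int),
    pvIsChain size bs s os → (∀ b ∈ bs, 0 ≤ b) → 0 ≤ s →
    ∀ p ∈ os.zip bs, 0 ≤ p.1 ∧ p.1 + p.2 ≤ size := by
  intro bs
  induction bs with
  | nil => rintro s os rfl _ _ p hp; cases hp
  | cons b rest ih =>
    rintro s os ⟨o, os', rfl, h1, h2, h3⟩ hb hs p hp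
    have hb0 : (0:Int) ≤ b := hb b (List.mem_cons_self ..)
    have hbrest : ∀ x ∈ rest, (0:Int) ≤ x := fun x hx => hb x (List.mem_cons_of_mem _ hx)
    rw [List.zip_cons_cons, List.mem_cons] at hp
    rcases hp with rfl | hp
    · have hsum : (0:Int) ≤ rest.sum := List.sum_nonneg hbrest
      have hlen : (0:Int) ≤ (rest.length : Int) := by positivity
      unfold pvE at h2
      constructor <;> omega
    · exact ih (o + b + 1) os' h3 hbrest (by omega) p hp

lemma pv_exists_chain (size : Int) : ∀ (bs : List Int) (s : Int),
    s + (((bs.length : Int) - 1) + bs.sum) ≤ size → ∃ os, pvIsChain size bs s os := by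
  intro bs
  induction bs with
  | nil => intro s _; exact ⟨[], rfl⟩
  | cons b rest ih =>
    intro s h
    simp only [List.length_cons, List.sum_cons] at h
    push_cast at h
    obtain ⟨w, hw⟩ := ih (s + b + 1) (by omega)
    exact ⟨s :: w, s, w, rfl, le_refl s, by unfold pvE; omega, hw⟩

lemma pv_covN_cons (o b i : Int) (os bs : List Int) :
    pvCovN (o :: os) (b :: bs) i = (if o ≤ i ∧ i < o + b then 1 else 0) + pvCovN os bs i := by
  unfold pvCovN
  rw [List.zip_cons_cons, List.countP_cons]
  by_cases h : o ≤ i ∧ i < o + b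
  · rw [if_pos h, if_pos (by simpa using h)]; omega
  · rw [if_neg h, if_neg (by simpa using h)]; omega

lemma pv_fill_iff (size : Int) : ∀ (bs : List Int) (s i : Int), (∀ b ∈ bs, 0 ≤ b) →
    ((∃ os, pvIsChain size bs s os ∧ 0 < pvCovN os bs i) ↔ pvFillCond size bs s i) := by
  intro bs
  induction bs with
  | nil =>
    intro s i hb
    constructor
    · rintro ⟨os, rfl, hcov⟩; simp [pvCovN] at hcov
    · rintro ⟨j, hj, _⟩; simp at hj
  | cons b rest ih =>
    intro s i hb
    have hb0 : (0:Int) ≤ b := hb b (List.mem_cons_self ..)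
    have hbrest : ∀ x ∈ rest, (0:Int) ≤ x := fun x hx => hb x (List.mem_cons_of_mem _ hx)
    have hsplit : ∀ j : Nat, (rest.take j).sum + (rest.drop j).sum = rest.sum := by
      intro j; rw [← List.sum_append, List.take_append_drop]
    constructor
    · rintro ⟨os, ⟨o, os', rfl, h1, h2, h3⟩, hcov⟩
      rw [pv_covN_cons] at hcov
      by_cases hc : o ≤ i ∧ i < o + b
      · refine ⟨0, by simp, ?_, ?_⟩
        · simp only [List.getElem_cons_zero]; omega
        · simp only [List.getElem_cons_zero, List.take_zero, List.sum_nil, List.drop_zero,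
            List.sum_cons, List.length_cons]
          unfold pvE at h2
          push_cast
          omega
      · rw [if_neg hc] at hcov
        obtain ⟨j, hj, hbj, hle⟩ := (ih (o + b + 1) i hbrest).1 ⟨os', h3, by omega⟩
        refine ⟨j + 1, by simpa using Nat.succ_lt_succ hj, ?_, ?_⟩
        · simpa using hbj
        · simp only [List.getElem_cons_succ, List.take_succ_cons, List.sum_cons,
            List.drop_succ_cons, List.length_cons] at hle ⊢
          push_cast at hle ⊢
          omega
    · rintro ⟨j, hj, hbj, hle⟩
      match j, hj with
      | 0, hj =>
        simp only [List.getElem_cons_zero] at hbj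
        simp only [List.getElem_cons_zero, List.take_zero, List.sum_nil, List.drop_zero,
          List.sum_cons, List.length_cons] at hle
        push_cast at hle
        set o := max s (i - b + 1) with ho
        have hoE : o ≤ pvE size b rest := by unfold pvE; omega
        obtain ⟨w, hw⟩ := pv_exists_chain size rest (o + b + 1) (by unfold pvE at hoE; omega)
        refine ⟨o :: w, ⟨o, w, rfl, by omega, hoE, hw⟩, ?_⟩
        rw [pv_covN_cons, if_pos (by omega)]
        omega
      | j' + 1, hj =>
        simp only [List.getElem_cons_succ, List.take_succ_cons, List.sum_cons,
          List.drop_succ_cons, List.length_cons] at hbj hle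
        push_cast at hle
        have hts : (rest.take j').sum + (rest.drop j').sum = rest.sum := hsplit j'
        obtain ⟨os', h3, hcov'⟩ := (ih (s + b + 1) i hbrest).2
          ⟨j', by simpa using hj, hbj, by omega⟩
        have hsE : s ≤ pvE size b rest := by unfold pvE; omega
        refine ⟨s :: os', ⟨s, os', rfl, le_refl s, hsE, h3⟩, ?_⟩
        rw [pv_covN_cons]
        omega

lemma pv_empty_iff (size : Int) : ∀ (bs : List Int) (s i : Int), (∀ b ∈ bs, 0 ≤ b) →
    s ≤ i + 1 → i < size →
    ((∃ os, pvIsChain size bs s os ∧ pvCovN os bs i = 0) ↔ pvEmptyCond size bs s i) := by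
  intro bs
  induction bs with
  | nil =>
    intro s i hb hs hi
    constructor
    · rintro -
      exact ⟨0, by simp, Or.inl rfl, by simp; omega⟩
    · rintro -
      exact ⟨[], rfl, by simp [pvCovN]⟩
  | cons b rest ih =>
    intro s i hb hs hi
    have hb0 : (0:Int) ≤ b := hb b (List.mem_cons_self ..)
    have hbrest : ∀ x ∈ rest, (0:Int) ≤ x := fun x hx => hb x (List.mem_cons_of_mem _ hx)
    have hsplit : ∀ j : Nat, (rest.take j).sum + (rest.drop j).sum = rest.sum := by
      intro j; rw [← List.sum_append, List.take_append_drop]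
    constructor
    · rintro ⟨os, ⟨o, os', rfl, h1, h2, h3⟩, hcov⟩
      rw [pv_covN_cons] at hcov
      by_cases hc : o ≤ i ∧ i < o + b
      · rw [if_pos hc] at hcov; exact absurd hcov (by omega)
      · rw [if_neg hc] at hcov
        have hcov' : pvCovN os' rest i = 0 := by omega
        by_cases hleft : o + b ≤ i
        · obtain ⟨j, hjle, hl, hr⟩ := (ih (o + b + 1) i hbrest (by omega) hi).1 ⟨os', h3, hcov'⟩
          refine ⟨j + 1, by simpa using Nat.succ_le_succ hjle, Or.inr ?_, ?_⟩
          · simp only [List.take_succ_cons, List.sum_cons]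
            push_cast
            rcases hl with rfl | hl
            · simp only [List.take_zero, List.sum_nil]; push_cast; omega
            · omega
          · simp only [List.drop_succ_cons, List.length_cons] at hr ⊢
            push_cast at hr ⊢
            omega
        · -- head block is strictly right of i
          have hio : i < o := by omega
          refine ⟨0, by simp, Or.inl rfl, ?_⟩
          simp only [List.drop_zero, List.sum_cons, List.length_cons]
          unfold pvE at h2
          push_cast
          omega
    · rintro ⟨j, hjle, hl, hr⟩
      match j, hjle with
      | 0, hjle =>
        simp only [List.drop_zero, List.sum_cons, List.length_cons] at hr
        push_cast at hr
        have hE : i + 1 ≤ pvE size b rest := by unfold pvE; omega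
        obtain ⟨w, hw⟩ := pv_exists_chain size rest (i + 1 + b + 1) (by unfold pvE at hE; omega)
        refine ⟨(i + 1) :: w, ⟨i + 1, w, rfl, hs, hE, hw⟩, ?_⟩
        rw [pv_covN_cons, if_neg (by omega)]
        simpa using pv_noCov_of_lt size rest (i + 1 + b + 1) w i hw hbrest (by omega)
      | j' + 1, hjle =>
        simp only [List.take_succ_cons, List.sum_cons, List.drop_succ_cons,
          List.length_cons] at hl hr
        rcases hl with hl | hl
        · exact absurd hl (by omega)
        push_cast at hl hr
        have hts : (rest.take j').sum + (rest.drop j').sum = rest.sum := hsplit j'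
        have htn : (0:Int) ≤ (rest.take j').sum :=
          List.sum_nonneg (fun x hx => hbrest x (List.take_subset _ _ hx))
        obtain ⟨os', h3, hcov'⟩ := (ih (s + b + 1) i hbrest (by omega) hi).2
          ⟨j', by simpa using hjle, Or.inr (by omega), by omega⟩
        have hsE : s ≤ pvE size b rest := by unfold pvE; omega
        refine ⟨s :: os', ⟨s, os', rfl, le_refl s, hsE, h3⟩, ?_⟩
        rw [pv_covN_cons, if_neg (by omega)]
        simpa using hcov'


def pvStart (blocks offsets : List Int) : Int :=
  if offsets.isEmpty then 0
  else PySem.List.pyGetD offsets (-1) 0 + PySem.List.pyGetD blocks ((offsets.length : Int) - 1) 0 + 1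

lemma pv_findAux_eq (size : Int) (blocks : List Int) :
    ∀ (fuel : Nat) (offsets : List Int) (result : List (List Int)),
    offsets.length ≤ blocks.length → blocks.length ≤ offsets.length + fuel →
    pvA_findAux size blocks fuel offsets result =
      result ++ (pvChains size (blocks.drop offsets.length) (pvStart blocks offsets)).map (offsets ++ ·) := by
  intro fuel
  induction fuel with
  | zero =>
    intro offsets result h1 h2
    have he : offsets.length = blocks.length := by omega
    rw [pvA_findAux, if_pos he, he, List.drop_length]
    simp [pvChains]
  | succ fuel' ih =>
    intro offsets result h1 h2
    by_cases he : offsets.length = blocks.length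
    · rw [pvA_findAux, if_pos he, he, List.drop_length]
      simp [pvChains]
    · have hlt : offsets.length < blocks.length := by omega
      rw [pvA_findAux, if_neg he]
      have hsc : (if offsets.isEmpty = false then
          (PySem.List.pyGetD offsets (-1) 0 + PySem.List.pyGetD blocks ((offsets.length : Int) - 1) 0 + 1,
           ((offsets.length : Int) - 1) + 1)
          else ((0:Int), (0:Int))) = (pvStart blocks offsets, (offsets.length : Int)) := by
        unfold pvStart
        by_cases hoe : offsets.isEmpty
        · rw [if_neg (by simp [hoe]), if_pos hoe]
          simp [List.isEmpty_iff.1 hoe]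
        · rw [if_pos (by simpa using hoe), if_neg hoe]
          refine Prod.ext rfl ?_
          simp
      rw [hsc]
      simp only
      rw [PySem.List.slice_from_natCast]
      have hdrop : blocks.drop offsets.length =
          blocks[offsets.length] :: blocks.drop (offsets.length + 1) :=
        List.drop_eq_getElem_cons hlt
      have hfold : ∀ (acc : List (List Int)) (o : Int),
          o ∈ PySem.List.pyRange (pvStart blocks offsets)
                (size - (((blocks.drop offsets.length).length : Int) - 1 + (blocks.drop offsets.length).sum) + 1) 1 →
          pvA_findAux size blocks fuel' (offsets ++ [o]) acc =
            acc ++ (pvChains size (blocks.drop (offsets.length + 1)) (o + blocks[offsets.length] + 1)).map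
              (fun x => offsets ++ [o] ++ x) := by
        intro acc o _
        rw [ih (offsets ++ [o]) acc (by simpa using hlt) (by simp; omega)]
        have hst : pvStart blocks (offsets ++ [o]) = o + blocks[offsets.length] + 1 := by
          unfold pvStart
          rw [if_neg (by simp)]
          rw [PySem.List.pyGetD_neg_one_append_singleton]
          have hl : ((offsets ++ [o]).length : Int) - 1 = (offsets.length : Int) := by simp
          rw [hl, PySem.List.pyGetD_natCast, List.getD_eq_getElem _ _ hlt]
        have hdl : List.drop (offsets ++ [o]).length blocks = List.drop (offsets.length + 1) blocks := by
          simp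
        rw [hst, hdl]
      rw [PySem.List.foldl_congr_mem _ _
          (fun acc o => acc ++ (pvChains size (blocks.drop (offsets.length + 1))
            (o + blocks[offsets.length] + 1)).map (fun x => offsets ++ [o] ++ x)) _ hfold,
        PySem.List.foldl_append_eq_flatMap]
      congr 1
      conv_rhs => rw [hdrop]
      simp only [pvChains]
      have hE : pvE size blocks[offsets.length] (blocks.drop (offsets.length + 1)) + 1 =
          size - (((blocks.drop offsets.length).length : Int) - 1 + (blocks.drop offsets.length).sum) + 1 := by
        unfold pvE
        rw [hdrop]
        push_cast [List.length_cons, List.sum_cons]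
        ring
      rw [hE, List.map_flatMap]
      congr 1
      funext o
      rw [List.map_map]
      apply List.map_congr_left
      intro x _
      simp

lemma pv_placements_eq (size : Int) (blocks : List Int) (h : blocks ≠ []) :
    pvA_find_placements size blocks = pvChains size blocks 0 := by
  unfold pvA_find_placements
  rw [if_neg (by simpa using h),
    pv_findAux_eq size blocks blocks.length [] [] (by simp) (by simp)]
  unfold pvStart
  simp

lemma pv_incr_spec (cs : List Int) (i : Int) (h0 : 0 ≤ i) (h1 : i < (cs.length : Int)) :
    (pvA_incr cs i).length = cs.length ∧
    ∀ n : Nat, (pvA_incr cs i).getD n 0 = cs.getD n 0 + (if (n : Int) = i then 1 else 0) := by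
  unfold pvA_incr
  rw [PySem.List.pySetD_of_nonneg _ _ h0,
    PySem.List.pyGetD_eq_getElem _ _ h0 (by exact_mod_cast h1)]
  refine ⟨by simp, ?_⟩
  intro n
  have hi : i.toNat < cs.length := by omega
  by_cases hn : n = i.toNat
  · subst hn
    rw [if_pos (by omega)]
    rw [List.getD_eq_getElem _ _ (by simpa using hi), List.getElem_set_self,
      List.getD_eq_getElem _ _ hi]
  · rw [if_neg (by omega)]
    by_cases hlt : n < cs.length
    · rw [List.getD_eq_getElem _ _ (by simpa using hlt), List.getElem_set_ne (by omega),
        List.getD_eq_getElem _ _ hlt]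
      ring
    · rw [List.getD_eq_default _ _ (by simpa using hlt), List.getD_eq_default _ _ (by omega)]
      rfl

lemma pv_range_incr_spec (bnd : Int) :
    ∀ (k : Nat) (a : Int) (cs : List Int), (bnd - a).toNat ≤ k → 0 ≤ a → bnd ≤ (cs.length : Int) →
    (((PySem.List.pyRange a bnd 1).foldl pvA_incr cs).length = cs.length ∧
     ∀ n : Nat, ((PySem.List.pyRange a bnd 1).foldl pvA_incr cs).getD n 0 =
       cs.getD n 0 + (if a ≤ (n:Int) ∧ (n:Int) < bnd then 1 else 0)) := by
  intro k
  induction k with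
  | zero =>
    intro a cs hk h0 h1
    rw [PySem.List.pyRange_one_eq_nil (by omega)]
    refine ⟨by rw [List.foldl_nil], fun n => by rw [List.foldl_nil, if_neg (by omega)]; omega⟩
  | succ k ih =>
    intro a cs hk h0 h1
    by_cases hab : bnd ≤ a
    · rw [PySem.List.pyRange_one_eq_nil (by omega)]
      refine ⟨by rw [List.foldl_nil], fun n => by rw [List.foldl_nil, if_neg (by omega)]; omega⟩
    · rw [PySem.List.pyRange_one_cons (by omega), List.foldl_cons]
      obtain ⟨hlen1, hget1⟩ := pv_incr_spec cs a h0 (by omega)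
      obtain ⟨hlen2, hget2⟩ := ih (a + 1) (pvA_incr cs a) (by omega) (by omega) (by omega)
      refine ⟨by rw [hlen2, hlen1], ?_⟩
      intro n
      rw [hget2, hget1]
      by_cases hna : (n : Int) = a
      · rw [if_pos hna, if_neg (by omega), if_pos (by omega)]; ring
      · rw [if_neg hna]
        by_cases hin : a + 1 ≤ (n:Int) ∧ (n:Int) < bnd
        · rw [if_pos hin, if_pos (by omega)]; ring
        · rw [if_neg hin, if_neg (by omega)]; ring

lemma pv_pairs_spec : ∀ (ps : List (Int × Int)) (cs : List Int),
    (∀ p ∈ ps, 0 ≤ p.1 ∧ p.1 + p.2 ≤ (cs.length : Int)) →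
    ((ps.foldl (fun cs2 p => (PySem.List.pyRange p.1 (p.1 + p.2) 1).foldl pvA_incr cs2) cs).length = cs.length ∧
     ∀ n : Nat, (ps.foldl (fun cs2 p => (PySem.List.pyRange p.1 (p.1 + p.2) 1).foldl pvA_incr cs2) cs).getD n 0 =
       cs.getD n 0 + ((ps.countP (fun p => decide (p.1 ≤ (n:Int) ∧ (n:Int) < p.1 + p.2)) : Int))) := by
  intro ps
  induction ps with
  | nil => intro cs _; exact ⟨rfl, fun n => by simp⟩
  | cons p ps ih =>
    intro cs hps
    obtain ⟨hp1, hp2⟩ := hps p (List.mem_cons_self ..)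
    rw [List.foldl_cons]
    obtain ⟨hlen1, hget1⟩ := pv_range_incr_spec (p.1 + p.2) (p.1 + p.2 - p.1).toNat p.1 cs le_rfl hp1 hp2
    obtain ⟨hlen2, hget2⟩ := ih ((PySem.List.pyRange p.1 (p.1 + p.2) 1).foldl pvA_incr cs)
      (fun q hq => by rw [hlen1]; exact hps q (List.mem_cons_of_mem _ hq))
    refine ⟨by rw [hlen2, hlen1], ?_⟩
    intro n
    rw [hget2 n, hget1 n, List.countP_cons]
    by_cases hc : p.1 ≤ (n:Int) ∧ (n:Int) < p.1 + p.2
    · rw [if_pos hc, if_pos (by simpa using hc)]; push_cast; ring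
    · rw [if_neg hc, if_neg (by simpa using hc)]; push_cast; ring

lemma pv_enum_fold (blocks : List Int) (g : List Int → Int → Int → List Int) :
    ∀ (os : List Int) (d : Nat) (cs : List Int), d + os.length ≤ blocks.length →
    (PySem.List.enumerate os (d : Int)).foldl (fun cs2 p => g cs2 p.2 (PySem.List.pyGetD blocks p.1 0)) cs =
    (os.zip (blocks.drop d)).foldl (fun cs2 p => g cs2 p.1 p.2) cs := by
  intro os
  induction os with
  | nil => intro d cs _; rw [PySem.List.enumerate_nil]; simp
  | cons o os ih =>
    intro d cs hd
    have hlt : d < blocks.length := by simp at hd; omega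
    rw [PySem.List.enumerate_cons, List.foldl_cons, List.drop_eq_getElem_cons hlt,
      List.zip_cons_cons, List.foldl_cons]
    simp only [PySem.List.pyGetD_natCast, List.getD_eq_getElem _ _ hlt]  
    have : ((d : Int) + 1) = ((d + 1 : Nat) : Int) := by push_cast; ring
    rw [this, ih (d + 1) _ (by simp at hd ⊢; omega)]

lemma pv_addPlacement_spec (size : Int) (blocks : List Int) (cs os : List Int)
    (hch : pvIsChain size blocks 0 os) (hb : ∀ b ∈ blocks, 0 ≤ b) (hsz : size ≤ (cs.length : Int)) :
    (pvA_addPlacement blocks cs os).length = cs.length ∧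
    ∀ n : Nat, (pvA_addPlacement blocks cs os).getD n 0 =
      cs.getD n 0 + (pvCovN os blocks (n : Int) : Int) := by
  have hlen := pv_chain_len size blocks 0 os hch
  unfold pvA_addPlacement
  have heq : PySem.List.enumerate os (0 : Int) = PySem.List.enumerate os ((0 : Nat) : Int) := rfl
  rw [heq, pv_enum_fold blocks (fun cs2 x y => (PySem.List.pyRange x (x + y) 1).foldl pvA_incr cs2)
    os 0 cs (by omega), List.drop_zero]
  have hbounds := pv_chain_cell_bounds size blocks 0 os hch hb le_rfl
  obtain ⟨h1, h2⟩ := pv_pairs_spec (os.zip blocks) cs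
    (fun p hp => ⟨(hbounds p hp).1, le_trans (hbounds p hp).2 hsz⟩)
  exact ⟨h1, fun n => by rw [h2 n]; rfl⟩

lemma pv_counters_spec (size : Int) (blocks : List Int) (hb : ∀ b ∈ blocks, 0 ≤ b) :
    ∀ (chs : List (List Int)) (cs : List Int),
    (∀ os ∈ chs, pvIsChain size blocks 0 os) → size ≤ (cs.length : Int) →
    ((chs.foldl (pvA_addPlacement blocks) cs).length = cs.length ∧
     ∀ n : Nat, (chs.foldl (pvA_addPlacement blocks) cs).getD n 0 =
       cs.getD n 0 + ((chs.map (fun os => (pvCovN os blocks (n:Int) : Int))).sum)) := by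
  intro chs
  induction chs with
  | nil => intro cs _ _; exact ⟨rfl, fun n => by simp⟩
  | cons os chs ih =>
    intro cs hchs hsz
    rw [List.foldl_cons]
    obtain ⟨hlen1, hget1⟩ := pv_addPlacement_spec size blocks cs os
      (hchs os (List.mem_cons_self ..)) hb hsz
    obtain ⟨hlen2, hget2⟩ := ih (pvA_addPlacement blocks cs os)
      (fun o ho => hchs o (List.mem_cons_of_mem _ ho)) (by rw [hlen1]; exact hsz)
    refine ⟨by rw [hlen2, hlen1], ?_⟩
    intro n
    rw [hget2 n, hget1 n, List.map_cons, List.sum_cons]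
    ring

lemma pv_sum_zero_iff : ∀ (l : List Int), (∀ x ∈ l, 0 ≤ x) → (l.sum = 0 ↔ ∀ x ∈ l, x = 0) := by
  intro l
  induction l with
  | nil => simp
  | cons x l ih =>
    intro h
    have hx := h x (List.mem_cons_self ..)
    have hrest : ∀ y ∈ l, (0:Int) ≤ y := fun y hy => h y (List.mem_cons_of_mem _ hy)
    have hs : (0:Int) ≤ l.sum := List.sum_nonneg hrest
    rw [List.sum_cons]
    constructor
    · intro he
      have hx0 : x = 0 := by omega
      have hl0 : l.sum = 0 := by omega
      intro y hy
      rcases List.mem_cons.1 hy with rfl | hy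
      · exact hx0
      · exact ((ih hrest).1 hl0) y hy
    · intro hall
      have : l.sum = 0 := (ih hrest).2 (fun y hy => hall y (List.mem_cons_of_mem _ hy))
      rw [this, hall x (List.mem_cons_self ..)]
      ring

lemma pv_sum_le_len : ∀ (l : List Int), (∀ x ∈ l, x ≤ 1) → l.sum ≤ (l.length : Int) := by
  intro l
  induction l with
  | nil => simp
  | cons x l ih =>
    intro h
    have := ih (fun y hy => h y (List.mem_cons_of_mem _ hy))
    have := h x (List.mem_cons_self ..)
    simp only [List.sum_cons, List.length_cons]
    push_cast
    omega

lemma pv_sum_len_iff : ∀ (l : List Int), (∀ x ∈ l, x ≤ 1) →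
    (l.sum = (l.length : Int) ↔ ∀ x ∈ l, x = 1) := by
  intro l
  induction l with
  | nil => simp
  | cons x l ih =>
    intro h
    have hx := h x (List.mem_cons_self ..)
    have hrest : ∀ y ∈ l, y ≤ (1:Int) := fun y hy => h y (List.mem_cons_of_mem _ hy)
    have hs := pv_sum_le_len l hrest
    simp only [List.sum_cons, List.length_cons]
    constructor
    · intro he
      push_cast at he
      have hx1 : x = 1 := by omega
      have hl : l.sum = (l.length : Int) := by omega
      intro y hy
      rcases List.mem_cons.1 hy with rfl | hy
      · exact hx1
      · exact ((ih hrest).1 hl) y hy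
    · intro hall
      have : l.sum = (l.length : Int) := (ih hrest).2 (fun y hy => hall y (List.mem_cons_of_mem _ hy))
      rw [this, hall x (List.mem_cons_self ..)]
      push_cast
      ring

lemma pv_prefix_go : ∀ (bs : List Int) (acc : List Int) (v : Int) (h : acc ≠ []),
    acc.getLast h = v →
    bs.foldl (fun a x => a ++ [PySem.List.pyGetD a (-1) 0 + x]) acc =
    acc ++ (List.range bs.length).map (fun j => v + (bs.take (j+1)).sum) := by
  intro bs
  induction bs with
  | nil => intro acc v h _; simp
  | cons x rest ih =>
    intro acc v h hv
    rw [List.foldl_cons, PySem.List.pyGetD_neg_one acc 0 h, hv]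
    have hne : acc ++ [v + x] ≠ [] := by simp
    have hlast : (acc ++ [v + x]).getLast hne = v + x := by
      simp
    rw [ih (acc ++ [v + x]) (v + x) hne hlast, List.append_assoc]
    congr 1
    rw [List.length_cons, List.range_succ_eq_map, List.map_cons, List.map_map,
      List.singleton_append]
    congr 1
    · simp
    · apply List.map_congr_left
      intro j _
      simp [List.take_succ_cons]
      ring

lemma pv_prefix_eq (blocks : List Int) :
    blocks.foldl (fun a x => a ++ [PySem.List.pyGetD a (-1) 0 + x]) [(0 : Int)] =
    (List.range (blocks.length + 1)).map (fun j => ((blocks.take j).sum : Int)) := by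
  rw [pv_prefix_go blocks [0] 0 (by simp) (by simp)]
  rw [List.range_succ_eq_map, List.map_cons, List.map_map, List.singleton_append]
  congr 1
  · simp

lemma pv_pfxget (blocks : List Int) (j : Nat) (hj : j < blocks.length + 1) :
    PySem.List.pyGetD ((List.range (blocks.length + 1)).map (fun t => ((blocks.take t).sum : Int))) (j : Int) 0 = (blocks.take j).sum := by
  rw [PySem.List.pyGetD_natCast, PySem.List.getD_map_range _ _ _ _ hj]

lemma pv_canfill_iff (size : Int) (blocks : List Int) (i : Int) :
    (((PySem.List.pyRange 0 ((blocks.length : Int)) 1).any (fun j =>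
      decide (0 < PySem.List.pyGetD blocks j 0) &&
      decide (max (PySem.List.pyGetD ((List.range (blocks.length + 1)).map (fun t => ((blocks.take t).sum : Int))) j 0 + j)
                  (i - PySem.List.pyGetD blocks j 0 + 1) ≤
              min (size - (blocks.sum - PySem.List.pyGetD ((List.range (blocks.length + 1)).map (fun t => ((blocks.take t).sum : Int))) j 0) - ((blocks.length : Int) - j - 1)) i))) = true)
    ↔ pvFillCond size blocks 0 i := by
  rw [List.any_eq_true]
  constructor
  · rintro ⟨j, hj, hcond⟩
    rw [PySem.List.mem_pyRange_one] at hj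
    obtain ⟨hj0, hjk⟩ := hj
    lift j to Nat using hj0 with j'
    have hjlt : j' < blocks.length := by exact_mod_cast hjk
    rw [pv_pfxget blocks j' (by omega),
      PySem.List.pyGetD_natCast, List.getD_eq_getElem _ _ hjlt] at hcond
    simp only [Bool.and_eq_true, decide_eq_true_eq] at hcond
    refine ⟨j', hjlt, hcond.1, ?_⟩
    have hts : (blocks.take j').sum + (blocks.drop j').sum = blocks.sum := by
      rw [← List.sum_append, List.take_append_drop]
    have hcond2 := hcond.2
    omega
  · rintro ⟨j', hjlt, hpos, hle⟩
    refine ⟨(j' : Int), ?_, ?_⟩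
    · rw [PySem.List.mem_pyRange_one]
      constructor
      · positivity
      · exact_mod_cast hjlt
    · rw [pv_pfxget blocks j' (by omega),
        PySem.List.pyGetD_natCast, List.getD_eq_getElem _ _ hjlt]
      simp only [Bool.and_eq_true, decide_eq_true_eq]
      have hts : (blocks.take j').sum + (blocks.drop j').sum = blocks.sum := by
        rw [← List.sum_append, List.take_append_drop]
      exact ⟨hpos, by omega⟩

lemma pv_canempty_iff (size : Int) (blocks : List Int) (i : Int) (hi : 0 ≤ i) :
    (((PySem.List.pyRange 0 ((blocks.length : Int) + 1) 1).any (fun j =>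
      decide (PySem.List.pyGetD ((List.range (blocks.length + 1)).map (fun t => ((blocks.take t).sum : Int))) j 0 + j - 1 ≤ i) &&
      decide ((blocks.sum - PySem.List.pyGetD ((List.range (blocks.length + 1)).map (fun t => ((blocks.take t).sum : Int))) j 0) + ((blocks.length : Int) - j) - 1 ≤ size - i - 1))) = true)
    ↔ pvEmptyCond size blocks 0 i := by
  rw [List.any_eq_true]
  constructor
  · rintro ⟨j, hj, hcond⟩
    rw [PySem.List.mem_pyRange_one] at hj
    obtain ⟨hj0, hjk⟩ := hj
    lift j to Nat using hj0 with j'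
    have hjle : j' ≤ blocks.length := by omega
    rw [pv_pfxget blocks j' (by omega)] at hcond
    simp only [Bool.and_eq_true, decide_eq_true_eq] at hcond
    have hts : (blocks.take j').sum + (blocks.drop j').sum = blocks.sum := by
      rw [← List.sum_append, List.take_append_drop]
    refine ⟨j', hjle, Or.inr (by omega), by omega⟩
  · rintro ⟨j', hjle, hl, hr⟩
    refine ⟨(j' : Int), ?_, ?_⟩
    · rw [PySem.List.mem_pyRange_one]
      constructor
      · positivity
      · omega
    · rw [pv_pfxget blocks j' (by omega)]
      simp only [Bool.and_eq_true, decide_eq_true_eq]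
      have hts : (blocks.take j').sum + (blocks.drop j').sum = blocks.sum := by
        rw [← List.sum_append, List.take_append_drop]
      have hl' : (blocks.take j').sum + (j' : Int) - 1 ≤ i := by
        rcases hl with rfl | hl
        · simp only [List.take_zero, List.sum_nil]; push_cast; omega
        · omega
      exact ⟨by omega, by omega⟩

-- ===== VERDICT (by name: the statement is the Claim_ definition above) =====
theorem determine_cell_states_spec : Claim_equal_determine_cell_states := by
  unfold Claim_equal_determine_cell_states
  intro size blocks _ hb
  unfold Spec_determine_cell_states determine_cell_states determine_cell_states_alt
  simp only [PySem.List.foldl_append_singleton_eq_map, List.nil_append, pv_prefix_eq]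
  by_cases hfeas : (blocks.length : Int) = 0 ∨ blocks.sum + (blocks.length : Int) - 1 > size
  · rw [if_pos hfeas]
    have hnil : pvA_find_placements size blocks = [] := by
      by_cases hne : blocks = []
      · subst hne; unfold pvA_find_placements; simp
      · have hfeas' : blocks.sum + (blocks.length : Int) - 1 > size := by
          rcases hfeas with h0 | h
          · exact absurd (List.length_eq_zero_iff.1 (by exact_mod_cast h0)) hne
          · exact h
        rw [pv_placements_eq size blocks hne]
        cases blocks with
        | nil => exact absurd rfl hne
        | cons b rest =>
          have hcast : ((b :: rest).length : Int) = (rest.length : Int) + 1 := by simp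
          rw [pvChains, PySem.List.pyRange_one_eq_nil (by
            unfold pvE
            rw [List.sum_cons] at hfeas'
            rw [hcast] at hfeas'
            omega)]
          simp
    rw [hnil, List.foldl_nil, List.map_map]
    have hcomp : ((fun cnt => if cnt = 0 then (2:Int) else
          if cnt = ((pvA_find_placements size blocks).length : Int) then 3 else 1) ∘ (fun _ : Int => (0:Int)))
        = fun _ : Int => (2:Int) := by
      funext x
      simp
    rw [hnil] at hcomp
    rw [hcomp, List.map_const', PySem.List.length_pyRange_one]
    norm_num
  · rw [if_neg hfeas]
    have hne : blocks ≠ [] := by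
      intro h
      exact hfeas (Or.inl (by subst h; simp))
    · rw [pv_placements_eq size blocks hne]
      have hmem : ∀ os ∈ pvChains size blocks 0, pvIsChain size blocks 0 os :=
        fun os h => (pv_mem_chains size blocks 0 os).1 h
      have hsz : size ≤ (((PySem.List.pyRange 0 size 1).map (fun _ => (0:Int))).length : Int) := by
        rw [List.length_map, PySem.List.length_pyRange_one]
        omega
      obtain ⟨hclen, hcget⟩ := pv_counters_spec size blocks hb (pvChains size blocks 0)
        ((PySem.List.pyRange 0 size 1).map (fun _ => (0:Int))) hmem hsz
      apply List.ext_getElem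
      · simp only [List.length_map, hclen]
      · intro n h1 h2
        rw [List.getElem_map, List.getElem_map, PySem.List.getElem_pyRange_one, zero_add]
        have hnsize : (n : Int) < size := by
          rw [List.length_map, PySem.List.length_pyRange_one] at h2
          omega
        have hn0 : (0:Int) ≤ (n:Int) := by positivity
        -- the counter at cell n
        have hcn : (List.foldl (pvA_addPlacement blocks)
              ((PySem.List.pyRange 0 size 1).map (fun _ => (0:Int))) (pvChains size blocks 0))[n] =
            ((pvChains size blocks 0).map (fun os => (pvCovN os blocks (n:Int) : Int))).sum := by
          have h1' : n < (List.foldl (pvA_addPlacement blocks)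
              ((PySem.List.pyRange 0 size 1).map (fun _ => (0:Int))) (pvChains size blocks 0)).length := by
            simpa using h1
          rw [← List.getD_eq_getElem _ 0 h1', hcget n]
          have : ((PySem.List.pyRange 0 size 1).map (fun _ => (0:Int))).getD n 0 = 0 := by
            rcases Nat.lt_or_ge n ((PySem.List.pyRange 0 size 1).map (fun _ => (0:Int))).length with h | h
            · rw [List.getD_eq_getElem _ _ h, List.getElem_map]
            · rw [List.getD_eq_default _ _ h]
          rw [this, zero_add]
        rw [hcn]
        -- abbreviations
        have h01 : ∀ x ∈ (pvChains size blocks 0).map (fun os => (pvCovN os blocks (n:Int) : Int)),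
            0 ≤ x ∧ x ≤ 1 := by
          intro x hx
          rw [List.mem_map] at hx
          obtain ⟨os, hos, rfl⟩ := hx
          have := pv_covN_le_one size blocks 0 os (n:Int) (hmem os hos) hb
          constructor
          · positivity
          · exact_mod_cast this
        have hz : (((pvChains size blocks 0).map (fun os => (pvCovN os blocks (n:Int) : Int))).sum = 0)
            ↔ ¬ pvFillCond size blocks 0 (n:Int) := by
          rw [pv_sum_zero_iff _ (fun x hx => (h01 x hx).1), ← pv_fill_iff size blocks 0 (n:Int) hb]
          constructor
          · rintro hall ⟨os, hos, hpos⟩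
            have := hall ((pvCovN os blocks (n:Int) : Int))
              (List.mem_map_of_mem ((pv_mem_chains size blocks 0 os).2 hos))
            omega
          · intro hnex x hx
            rw [List.mem_map] at hx
            obtain ⟨os, hos, rfl⟩ := hx
            by_contra hne0
            exact hnex ⟨os, hmem os hos, by omega⟩
        have hf : (((pvChains size blocks 0).map (fun os => (pvCovN os blocks (n:Int) : Int))).sum
              = ((pvChains size blocks 0).length : Int))
            ↔ ¬ pvEmptyCond size blocks 0 (n:Int) := by
          rw [show ((pvChains size blocks 0).length : Int) =
              (((pvChains size blocks 0).map (fun os => (pvCovN os blocks (n:Int) : Int))).length : Int)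
            by rw [List.length_map]]
          rw [pv_sum_len_iff _ (fun x hx => (h01 x hx).2),
            ← pv_empty_iff size blocks 0 (n:Int) hb (by omega) hnsize]
          constructor
          · rintro hall ⟨os, hos, hzero⟩
            have := hall ((pvCovN os blocks (n:Int) : Int))
              (List.mem_map_of_mem ((pv_mem_chains size blocks 0 os).2 hos))
            omega
          · intro hnex x hx
            rw [List.mem_map] at hx
            obtain ⟨os, hos, rfl⟩ := hx
            have hle := pv_covN_le_one size blocks 0 os (n:Int) (hmem os hos) hb
            by_contra hne1
            exact hnex ⟨os, hmem os hos, by omega⟩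
        by_cases hF : pvFillCond size blocks 0 (n:Int)
        · simp only [(pv_canfill_iff size blocks (n:Int)).2 hF]
          rw [if_neg (fun h => (hz.1 h) hF)]
          by_cases hE : pvEmptyCond size blocks 0 (n:Int)
          · simp only [(pv_canempty_iff size blocks (n:Int) hn0).2 hE]
            rw [if_neg (fun h => (hf.1 h) hE)]
            simp
          · simp only [Bool.eq_false_iff.mpr
              (fun hc => hE ((pv_canempty_iff size blocks (n:Int) hn0).1 hc))]
            rw [if_pos (hf.2 hE)]
            simp
        · simp only [Bool.eq_false_iff.mpr
            (fun hc => hF ((pv_canfill_iff size blocks (n:Int)).1 hc))]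
          rw [if_pos (hz.2 hF)]
          simp
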